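-- pv_equiv track=rewrite | github.com/MateuszRajmundKukawski/intervals-django | intervals-django/intervals/inter_plot/utils.py | szukajInterwalow
-- ===== SOURCE A (Python) =====
-- def szukajInterwalow(wykresTableY, ccuracy_liczba_probek, accuracy_pace_diff_for_interval_search, point_distance_minimal_between_interwals):
--     startInterwalu = []
--     stopInterwalu = []
--     startFound = 0
--     for i, tempo in enumerate(wykresTableY):
--         if i > ccuracy_liczba_probek:
--             if startFound == 0:
--                 licznik = 0
--                 for j in range(1, ccuracy_liczba_probek):  # szuka startu interwalu
--                     paceTemp = wykresTableY[i] - wykresTableY[i - j]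
--                     if paceTemp < -accuracy_pace_diff_for_interval_search:
--                         licznik += 1
--                     else:
--                         break
--                     paceTemp = 0
--                 if licznik == (
--                     ccuracy_liczba_probek - 1):  # sprawdza czy kolejnych 'ccuracy_liczba_probek' probek ma tempo o 'accuracy_pace_diff_for_interval_search' wieksze od probki bazowej
--                     if len(startInterwalu) != 0:
--                         if (i - startInterwalu[len(
--                                 startInterwalu) - 1]) > point_distance_minimal_between_interwals:  # sprawdza czy nie znalazl kolejnego punktu bezposrednio obok poprzedniego
--                             startInterwalu.append(i)
--                             startFound = 1  # flaga- mozna zaczac szukanie konca interwalu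
--                     else:
--                         startInterwalu.append(i)
--                         startFound = 1  # flaga- mozna zaczac szukanie konca interwalu
--             if startFound == 1:
--                 licznik = 0
--                 for j in range(1, ccuracy_liczba_probek):  # szuka stopu interwalu
--                     paceTemp = wykresTableY[i] - wykresTableY[i - j]
--                     if paceTemp > accuracy_pace_diff_for_interval_search:
--                         licznik += 1
--                     else:
--                         break
--                     paceTemp = 0
--                 if licznik == (
--                     ccuracy_liczba_probek - 1):  # sprawdza czy kolejnych 'ccuracy_liczba_probek' probek ma tempo o 'accuracy_pace_diff_for_interval_search' mniejsze od probki bazowej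
--                     if len(stopInterwalu) != 0:
--                         if (i - stopInterwalu[len(
--                                 stopInterwalu) - 1]) > point_distance_minimal_between_interwals:  # sprawdza czy nie znalazl kolejnego punktu bezposrednio obok poprzedniego
--                             stopInterwalu.append(i)
--                             startFound = 0
--                     else:
--                         stopInterwalu.append(i)
--                         startFound = 0
--             else:
--                 continue
--     return startInterwalu, stopInterwalu
-- ===== SOURCE B (Python) =====
-- def szukajInterwalow(wykresTableY, ccuracy_liczba_probek, accuracy_pace_diff_for_interval_search, point_distance_minimal_between_interwals):
--     y = wykresTableY
--     k = ccuracy_liczba_probek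
--     acc = accuracy_pace_diff_for_interval_search
--     dmin = point_distance_minimal_between_interwals
--     start, stop = [], []
--     if k < 1:
--         return start, stop
--     # Monotonic queues over the sliding window y[i-k+1:i] of the k-1 previous
--     # samples: dlo[lo:] is nondecreasing with dlo[lo] = window minimum, and dhi
--     # holds the negated samples so dhi[hi] = -(window maximum).  A start point
--     # needs every window sample > y[i]+acc, i.e. window min > y[i]+acc; a stop
--     # point needs every window sample < y[i]-acc, i.e. -(window max) > acc-y[i].
--     dlo, lo = [], 0
--     dhi, hi = [], 0
--     sf = 0
--     for i, v in enumerate(y):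
--         if i > k:
--             if sf == 0 and (lo == len(dlo) or dlo[lo] > v + acc):
--                 if not start or i - start[-1] > dmin:
--                     start.append(i)
--                     sf = 1
--             if sf == 1 and (hi == len(dhi) or dhi[hi] > acc - v):
--                 if not stop or i - stop[-1] > dmin:
--                     stop.append(i)
--                     sf = 0
--         while len(dlo) > lo and dlo[-1] > v:
--             dlo.pop()
--         dlo.append(v)
--         while len(dhi) > hi and dhi[-1] > -v:
--             dhi.pop()
--         dhi.append(-v)
--         j = i - k + 1
--         if j >= 0:
--             if lo < len(dlo) and dlo[lo] == y[j]:
--                 lo += 1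
--             if hi < len(dhi) and dhi[hi] == -y[j]:
--                 hi += 1
--     return start, stop
-- ===== Notes on version B (the rewrite author's own statement) =====
-- stated objective: alternative
-- what changed: A re-tests the start/stop conditions at every index by re-scanning up to k-1 preceding samples (with early break); B instead maintains two monotonic queues holding the sliding-window minimum of the signal and of its negation, so each test becomes a single comparison against the window min/max; on typical traces A's early break already makes it cheap, so B trades the rescans for queue maintenance at similar measured cost.
import Mathlib
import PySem

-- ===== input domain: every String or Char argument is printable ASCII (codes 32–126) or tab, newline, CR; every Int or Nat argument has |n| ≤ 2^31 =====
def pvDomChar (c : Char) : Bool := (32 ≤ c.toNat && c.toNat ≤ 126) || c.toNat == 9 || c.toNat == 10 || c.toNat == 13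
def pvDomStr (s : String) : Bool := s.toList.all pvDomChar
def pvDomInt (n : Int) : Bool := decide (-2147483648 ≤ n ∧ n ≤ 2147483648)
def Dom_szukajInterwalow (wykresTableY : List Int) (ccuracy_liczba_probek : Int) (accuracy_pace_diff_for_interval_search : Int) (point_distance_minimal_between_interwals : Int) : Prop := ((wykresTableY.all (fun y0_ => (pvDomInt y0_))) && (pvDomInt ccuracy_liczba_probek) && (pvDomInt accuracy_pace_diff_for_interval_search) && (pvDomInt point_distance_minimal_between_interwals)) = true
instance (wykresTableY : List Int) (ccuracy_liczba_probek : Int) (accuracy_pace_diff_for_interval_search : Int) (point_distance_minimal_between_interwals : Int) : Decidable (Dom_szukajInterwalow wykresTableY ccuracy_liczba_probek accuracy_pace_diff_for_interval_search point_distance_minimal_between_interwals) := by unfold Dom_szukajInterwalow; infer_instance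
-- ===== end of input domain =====

-- B replaces A's per-index re-scan of the k-1 preceding samples by two monotonic queues
-- (sliding-window minimum of the signal and of its negation), so each start/stop test is a
-- single comparison; the interval start/stop state machine itself is unchanged.
-- ===== PORT A =====
-- inner 'for j in range(1, ccuracy_liczba_probek)' loop searching for an interval START
-- (paceTemp < -accuracy...): counts passing samples, breaks at the first failure.
-- y[i] and y[i-j] are always in range when the loop runs (i > k ≥ j ≥ 1), so pyGetD's
-- default 0 is unreachable.
def szCountStart (y : List Int) (i acc : Int) : List Int → Int → Int
  | [], licznik => licznik
  | j :: js, licznik =>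
      let paceTemp := PySem.List.pyGetD y i 0 - PySem.List.pyGetD y (i - j) 0
      if paceTemp < -acc then szCountStart y i acc js (licznik + 1) else licznik

-- inner loop searching for an interval STOP (paceTemp > accuracy...)
def szCountStop (y : List Int) (i acc : Int) : List Int → Int → Int
  | [], licznik => licznik
  | j :: js, licznik =>
      let paceTemp := PySem.List.pyGetD y i 0 - PySem.List.pyGetD y (i - j) 0
      if paceTemp > acc then szCountStop y i acc js (licznik + 1) else licznik

-- one iteration of A's outer 'for i, tempo in enumerate(wykresTableY)' loop;
-- state = (startInterwalu, stopInterwalu, startFound)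
def szStepA (y : List Int) (k acc dmin : Int)
    (s : List Int × List Int × Int) (p : Int × Int) : List Int × List Int × Int :=
  let i := p.1
  if i > k then
    let s1 :=
      if s.2.2 = 0 then
        let licznik := szCountStart y i acc (PySem.List.pyRange 1 k 1) 0
        if licznik = k - 1 then
          if s.1.length ≠ 0 then
            if i - PySem.List.pyGetD s.1 ((s.1.length : Int) - 1) 0 > dmin then
              (s.1 ++ [i], s.2.1, 1)
            else s
          else (s.1 ++ [i], s.2.1, 1)
        else s
      else s
    if s1.2.2 = 1 then
      let licznik := szCountStop y i acc (PySem.List.pyRange 1 k 1) 0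
      if licznik = k - 1 then
        if s1.2.1.length ≠ 0 then
          if i - PySem.List.pyGetD s1.2.1 ((s1.2.1.length : Int) - 1) 0 > dmin then
            (s1.1, s1.2.1 ++ [i], 0)
          else s1
        else (s1.1, s1.2.1 ++ [i], 0)
      else s1
    else s1
  else s

def szukajInterwalow (wykresTableY : List Int) (ccuracy_liczba_probek : Int) (accuracy_pace_diff_for_interval_search : Int) (point_distance_minimal_between_interwals : Int) : List Int × List Int :=
  let r := (PySem.List.enumerate wykresTableY 0).foldl
    (szStepA wykresTableY ccuracy_liczba_probek accuracy_pace_diff_for_interval_search point_distance_minimal_between_interwals)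
    ([], [], 0)
  (r.1, r.2.1)

-- ===== PORT B =====
-- 'while len(d) > lo and d[-1] > x: d.pop()'
def szPopGT (d : List Int) (lo : Nat) (x : Int) : List Int :=
  if h : lo < d.length ∧ PySem.List.pyGetD d (-1) 0 > x then
    szPopGT d.dropLast lo x
  else d
termination_by d.length
decreasing_by
  cases d with
  | nil => simp [PySem.List.pyGetD] at h
  | cons a t => simp [List.length_dropLast]

-- B's state: (start, stop, sf, dlo, lo, dhi, hi)
def szStepB (y : List Int) (k acc dmin : Int)
    (s : List Int × List Int × Int × List Int × Nat × List Int × Nat)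
    (p : Int × Int) : List Int × List Int × Int × List Int × Nat × List Int × Nat :=
  let i := p.1
  let v := p.2
  let dlo := s.2.2.2.1
  let lo := s.2.2.2.2.1
  let dhi := s.2.2.2.2.2.1
  let hi := s.2.2.2.2.2.2
  -- 'if sf == 0 and (lo == len(dlo) or dlo[lo] > v + acc): ...' (start search)
  let st1 : List Int × Int :=
    if i > k ∧ s.2.2.1 = 0 ∧ (lo = dlo.length ∨ PySem.List.pyGetD dlo (lo : Int) 0 > v + acc) then
      if s.1 = [] ∨ i - PySem.List.pyGetD s.1 (-1) 0 > dmin then (s.1 ++ [i], 1)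
      else (s.1, s.2.2.1)
    else (s.1, s.2.2.1)
  -- 'if sf == 1 and (hi == len(dhi) or dhi[hi] > acc - v): ...' (stop search)
  let st2 : List Int × Int :=
    if i > k ∧ st1.2 = 1 ∧ (hi = dhi.length ∨ PySem.List.pyGetD dhi (hi : Int) 0 > acc - v) then
      if s.2.1 = [] ∨ i - PySem.List.pyGetD s.2.1 (-1) 0 > dmin then (s.2.1 ++ [i], 0)
      else (s.2.1, st1.2)
    else (s.2.1, st1.2)
  -- push v / -v onto the monotonic queues, then retire the sample leaving the window
  let dlo' := szPopGT dlo lo v ++ [v]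
  let dhi' := szPopGT dhi hi (-v) ++ [-v]
  let j := i - k + 1
  let lohi : Nat × Nat :=
    if j ≥ 0 then
      ((if lo < dlo'.length ∧ PySem.List.pyGetD dlo' (lo : Int) 0 = PySem.List.pyGetD y j 0 then lo + 1 else lo),
       (if hi < dhi'.length ∧ PySem.List.pyGetD dhi' (hi : Int) 0 = -PySem.List.pyGetD y j 0 then hi + 1 else hi))
    else (lo, hi)
  (st1.1, st2.1, st2.2, dlo', lohi.1, dhi', lohi.2)

def szukajInterwalow_alt (wykresTableY : List Int) (ccuracy_liczba_probek : Int) (accuracy_pace_diff_for_interval_search : Int) (point_distance_minimal_between_interwals : Int) : List Int × List Int :=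
  if ccuracy_liczba_probek < 1 then ([], [])
  else
    let r := (PySem.List.enumerate wykresTableY 0).foldl
      (szStepB wykresTableY ccuracy_liczba_probek accuracy_pace_diff_for_interval_search point_distance_minimal_between_interwals)
      ([], [], 0, [], 0, [], 0)
    (r.1, r.2.1)

-- ===== PRECONDITION & SPEC =====
def Spec_szukajInterwalow (wykresTableY : List Int) (ccuracy_liczba_probek : Int) (accuracy_pace_diff_for_interval_search : Int) (point_distance_minimal_between_interwals : Int) (out : List Int × List Int) : Prop := out = szukajInterwalow_alt wykresTableY ccuracy_liczba_probek accuracy_pace_diff_for_interval_search point_distance_minimal_between_interwals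
instance (wykresTableY : List Int) (ccuracy_liczba_probek : Int) (accuracy_pace_diff_for_interval_search : Int) (point_distance_minimal_between_interwals : Int) (out : List Int × List Int) : Decidable (Spec_szukajInterwalow wykresTableY ccuracy_liczba_probek accuracy_pace_diff_for_interval_search point_distance_minimal_between_interwals out) := by unfold Spec_szukajInterwalow; infer_instance

-- ===== CLAIM (what is proved, stated in full; the proofs are below) =====
def Claim_equal_szukajInterwalow : Prop := ∀ (wykresTableY : List Int) (ccuracy_liczba_probek : Int) (accuracy_pace_diff_for_interval_search : Int) (point_distance_minimal_between_interwals : Int), Dom_szukajInterwalow wykresTableY ccuracy_liczba_probek accuracy_pace_diff_for_interval_search point_distance_minimal_between_interwals → Spec_szukajInterwalow wykresTableY ccuracy_liczba_probek accuracy_pace_diff_for_interval_search point_distance_minimal_between_interwals (szukajInterwalow wykresTableY ccuracy_liczba_probek accuracy_pace_diff_for_interval_search point_distance_minimal_between_interwals)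

-- ===== LEMMAS AND PROOFS =====
-- ===== abstract monotonic-queue model =====
def mqpush (d : List Int) (x : Int) : List Int :=
  if d.getLastD x > x then mqpush d.dropLast x else d ++ [x]
termination_by d.length
decreasing_by
  cases d with
  | nil => simp at *
  | cons a t => simp [List.length_dropLast]

def mqevict (d : List Int) (v : Int) : List Int :=
  match d with
  | [] => []
  | a :: t => if a = v then t else a :: t

def sfx : List Int → List Int
  | [] => []
  | a :: t => if t.all (fun b => a ≤ b) then a :: sfx t else sfx t

theorem mem_sfx {b : Int} : ∀ {t : List Int}, b ∈ sfx t → b ∈ t := by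
  intro t
  induction t with
  | nil => simp [sfx]
  | cons a t ih =>
    simp only [sfx]
    split
    · intro h
      rcases List.mem_cons.1 h with h | h
      · simp [h]
      · exact List.mem_cons_of_mem _ (ih h)
    · intro h; exact List.mem_cons_of_mem _ (ih h)

theorem sfx_min : ∀ {t : List Int}, t ≠ [] → ∃ a s, sfx t = a :: s ∧ ∀ b ∈ t, a ≤ b := by
  intro t
  induction t with
  | nil => simp
  | cons c t ih =>
    intro _
    by_cases hall : t.all (fun b => c ≤ b)
    · refine ⟨c, sfx t, by simp [sfx, hall], ?_⟩
      intro b hb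
      rcases List.mem_cons.1 hb with h | h
      · omega
      · exact of_decide_eq_true (List.all_eq_true.1 hall b h)
    · have ht : t ≠ [] := by
        intro hn; subst hn; simp at hall
      rcases ih ht with ⟨a, s, hsfx, ha⟩
      have hex : ∃ b0 ∈ t, ¬ c ≤ b0 := by
        by_contra hc
        push Not at hc
        exact hall (List.all_eq_true.2 (fun b hb => decide_eq_true (hc b hb)))
      rcases hex with ⟨b0, hb0, hb0c⟩
      refine ⟨a, s, by simp [sfx, hall, hsfx], ?_⟩
      intro b hb
      rcases List.mem_cons.1 hb with h | h
      · have := ha b0 hb0; omega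
      · exact ha b h

theorem mqpush_all : ∀ (d : List Int) (x : Int), (∀ b ∈ d, x < b) → mqpush d x = [x] := by
  intro d x
  fun_induction mqpush d x with
  | case1 d h ih =>
    intro hall
    exact ih (fun b hb => hall b (List.mem_of_mem_dropLast hb))
  | case2 d h =>
    intro hall
    cases d with
    | nil => simp
    | cons a t =>
      exfalso
      have hm : (a :: t).getLastD x ∈ a :: t := by
        rw [List.getLastD_cons]
        exact List.getLastD_mem_cons
      have := hall _ hm
      omega

theorem mqpush_cons {a x : Int} (hax : a ≤ x) : ∀ (d : List Int), mqpush (a :: d) x = a :: mqpush d x := by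
  intro d
  induction d using List.reverseRecOn with
  | nil =>
    have h1 : ¬ ([a].getLastD x > x) := by simp; omega
    have h2 : ¬ (([] : List Int).getLastD x > x) := by simp
    rw [mqpush, if_neg h1, mqpush, if_neg h2]
    simp
  | append_singleton t b ih =>
    have hL1 : (a :: (t ++ [b])).getLastD x = b := by
      rw [← List.cons_append, List.getLastD_concat]
    have hL2 : (t ++ [b]).getLastD x = b := List.getLastD_concat
    by_cases hb : b > x
    · have hd : (a :: (t ++ [b])).dropLast = a :: t := by
        rw [← List.cons_append, List.dropLast_concat]
      rw [mqpush, if_pos (by rw [hL1]; exact hb), hd, ih]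
      conv_rhs => rw [mqpush]
      rw [if_pos (by rw [hL2]; exact hb), List.dropLast_concat]
    · rw [mqpush, if_neg (by rw [hL1]; exact hb)]
      conv_rhs => rw [mqpush]
      rw [if_neg (by rw [hL2]; exact hb)]
      simp

theorem sfx_push (x : Int) : ∀ (w : List Int), sfx (w ++ [x]) = mqpush (sfx w) x := by
  intro w
  induction w with
  | nil => rw [mqpush]; simp [sfx]
  | cons a t ih =>
    by_cases h1 : t.all (fun b => a ≤ b)
    · by_cases h2 : a ≤ x
      · have hall : (t ++ [x]).all (fun b => a ≤ b) := by
          simp only [List.all_append, Bool.and_eq_true, h1, List.all_cons, List.all_nil,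
            Bool.and_true, true_and]
          exact decide_eq_true h2
        rw [List.cons_append, sfx, if_pos hall, ih, sfx, if_pos h1, mqpush_cons h2]
      · have hx : ∀ b ∈ sfx t, x < b := by
          intro b hb
          have := of_decide_eq_true (List.all_eq_true.1 h1 b (mem_sfx hb))
          omega
        have hall : ¬ (t ++ [x]).all (fun b => a ≤ b) := by
          simp only [List.all_append, Bool.and_eq_true, List.all_cons, List.all_nil,
            Bool.and_true]
          intro hc
          exact h2 (of_decide_eq_true hc.2)
        rw [List.cons_append, sfx, if_neg hall, ih, sfx, if_pos h1]
        rw [mqpush_all _ _ hx, mqpush_all _ _ ?_]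
        intro b hb
        rcases List.mem_cons.1 hb with h | h
        · omega
        · exact hx b h
    · have hall : ¬ (t ++ [x]).all (fun b => a ≤ b) := by
        simp only [List.all_append, Bool.and_eq_true]
        intro hc
        exact h1 hc.1
      rw [List.cons_append, sfx, if_neg hall, ih, sfx, if_neg h1]

theorem sfx_evict (a : Int) (t : List Int) : mqevict (sfx (a :: t)) a = sfx t := by
  by_cases h1 : t.all (fun b => a ≤ b)
  · rw [sfx, if_pos h1]
    simp [mqevict]
  · rw [sfx, if_neg h1]
    have hex : ∃ b0 ∈ t, ¬ a ≤ b0 := by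
      by_contra hc
      push Not at hc
      exact h1 (List.all_eq_true.2 (fun b hb => decide_eq_true (hc b hb)))
    rcases hex with ⟨b0, hb0, hb0a⟩
    have ht : t ≠ [] := by intro hn; subst hn; simp at hb0
    rcases sfx_min ht with ⟨a0, s, hsfx, ha0⟩
    rw [hsfx, mqevict]
    have := ha0 b0 hb0
    have hne : a0 ≠ a := by omega
    rw [if_neg hne]

theorem getLastD_drop (l : List Int) (n : Nat) (x : Int) (h : n < l.length) :
    (l.drop n).getLastD x = l.getLastD x := by
  simp [List.getLastD_eq_getLast?, List.getLast?_drop, Nat.not_le.2 h]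

theorem drop_dropLast' (l : List Int) (n : Nat) : (l.dropLast).drop n = (l.drop n).dropLast := by
  rw [List.dropLast_eq_take, List.dropLast_eq_take, List.drop_take]
  congr 1
  simp
  omega

-- d[lo] seen through the dropped suffix
theorem pyGetD_drop_head (d : List Int) (lo : Nat) (h : lo < d.length) :
    PySem.List.pyGetD d (lo : Int) 0 = (d.drop lo).headD 0 := by
  rw [List.drop_eq_getElem_cons h]
  simp [List.getD_eq_getElem?_getD, List.getElem?_eq_getElem h]

theorem getLastD_eq_py (d : List Int) (x : Int) (hne : d ≠ []) :
    d.getLastD x = PySem.List.pyGetD d (-1) 0 := by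
  rw [PySem.List.pyGetD_neg_one d 0 hne, List.getLastD_eq_getLast?, List.getLast?_eq_some_getLast hne]
  rfl

theorem push_bridge (d : List Int) (lo : Nat) (x : Int) (hlo : lo ≤ d.length) :
    (szPopGT d lo x ++ [x]).drop lo = mqpush (d.drop lo) x ∧ lo ≤ (szPopGT d lo x).length := by
  fun_induction szPopGT d lo x with
  | case1 d h ih =>
    have hne : d ≠ [] := by
      intro hn; subst hn; simp at h
    have hdl : lo ≤ d.dropLast.length := by
      simp [List.length_dropLast]; omega
    rcases ih hdl with ⟨ih1, ih2⟩
    refine ⟨?_, ih2⟩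
    rw [ih1, drop_dropLast']
    conv_rhs => rw [mqpush]
    rw [if_pos (by rw [getLastD_drop d lo x h.1, getLastD_eq_py d x hne]; exact h.2)]
  | case2 d h =>
    refine ⟨?_, hlo⟩
    rw [List.drop_append_of_le_length hlo]
    conv_rhs => rw [mqpush]
    rw [if_neg ?_]
    rcases Nat.lt_or_ge lo d.length with hlt | hge
    · rw [getLastD_drop d lo x hlt, getLastD_eq_py d x (by intro hn; subst hn; simp at hlt)]
      intro hc
      exact h ⟨hlt, hc⟩
    · rw [List.drop_eq_nil_of_le hge]
      simp

theorem evict_bridge (d : List Int) (lo : Nat) (v : Int) (hlo : lo ≤ d.length) :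
    d.drop (if lo < d.length ∧ PySem.List.pyGetD d (lo : Int) 0 = v then lo + 1 else lo)
      = mqevict (d.drop lo) v ∧
    (if lo < d.length ∧ PySem.List.pyGetD d (lo : Int) 0 = v then lo + 1 else lo) ≤ d.length := by
  rcases Nat.lt_or_ge lo d.length with hlt | hge
  · have hget : PySem.List.pyGetD d (lo : Int) 0 = d[lo] := by
      rw [pyGetD_drop_head d lo hlt, List.drop_eq_getElem_cons hlt]
      rfl
    by_cases hv : d[lo] = v
    · rw [if_pos ⟨hlt, by rw [hget]; exact hv⟩, List.drop_eq_getElem_cons hlt]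
      simp [mqevict, hv]
      omega
    · rw [if_neg (by intro hc; exact hv (by rw [← hget]; exact hc.2))]
      refine ⟨?_, hlo⟩
      rw [List.drop_eq_getElem_cons hlt]
      simp [mqevict, hv]
  · have hd : d.drop lo = [] := List.drop_eq_nil_of_le hge
    rw [if_neg (by intro hc; omega)]
    rw [hd]
    exact ⟨rfl, hlo⟩

theorem test_bridge (d : List Int) (lo : Nat) (b : Int) (w : List Int)
    (hlo : lo ≤ d.length) (hd : d.drop lo = sfx w) :
    ((lo = d.length ∨ PySem.List.pyGetD d (lo : Int) 0 > b) ↔ ∀ v ∈ w, b < v) := by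
  rcases Nat.lt_or_ge lo d.length with hlt | hge
  · have hne : d.drop lo ≠ [] := by
      intro hn
      have h2 := congrArg List.length hn
      simp at h2
      omega
    have hw : w ≠ [] := by
      intro hn
      subst hn
      apply hne
      rw [hd]
      rfl
    rcases sfx_min hw with ⟨a, s, hsfx, ha⟩
    have hhead : PySem.List.pyGetD d (lo : Int) 0 = a := by
      rw [pyGetD_drop_head d lo hlt, hd, hsfx]
      rfl
    constructor
    · intro hc v hv
      rcases hc with hc | hc
      · omega
      · rw [hhead] at hc
        have := ha v hv
        omega
    · intro hall
      right
      rw [hhead]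
      exact hall a (mem_sfx (by rw [hsfx]; simp))
  · have hd0 : d.drop lo = [] := List.drop_eq_nil_of_le hge
    have hw : w = [] := by
      by_contra hn
      rcases sfx_min hn with ⟨a, s, hsfx, _⟩
      rw [hd0, hsfx] at hd
      simp at hd
    subst hw
    simp
    omega

-- the window of the k-1 samples before index m (clamped at the left edge)
def winC (y : List Int) (K m : Nat) : List Int := (y.take m).drop (m + 1 - K)

theorem winC_zero (y : List Int) (K : Nat) : winC y K 0 = [] := by simp [winC]

theorem take_add_one' (l : List Int) (n : Nat) (h : n < l.length) :
    l.take (n+1) = l.take n ++ [l[n]] := by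
  rw [List.take_add_one]; simp [List.getElem?_eq_getElem h]

theorem winC_succ_lt (y : List Int) (K m : Nat) (hK : m + 1 < K) (hm : m < y.length) :
    winC y K (m+1) = winC y K m ++ [y[m]] := by
  unfold winC
  rw [show m + 1 + 1 - K = 0 by omega, show m + 1 - K = 0 by omega,
    take_add_one' y m hm]
  simp

theorem winC_succ_eq (y : List Int) (K m : Nat) (hK : 1 ≤ K) (h : K ≤ m + 1) (hm : m < y.length) :
    winC y K m ++ [y[m]] = y.getD (m + 1 - K) 0 :: winC y K (m+1) := by
  unfold winC
  have hlen : (y.take m).length = m := by simp; omega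
  rw [← List.drop_append_of_le_length (by omega : m + 1 - K ≤ (y.take m).length),
    ← take_add_one' y m hm]
  have hlt : m + 1 - K < (y.take (m+1)).length := by simp; omega
  rw [List.drop_eq_getElem_cons hlt, show m + 1 - K + 1 = m + 1 + 1 - K by omega]
  congr 1
  rw [List.getElem_take, List.getD_eq_getElem y 0 (by omega)]

theorem winC_length (y : List Int) (K m : Nat) (hK : K ≤ m) (hm : m ≤ y.length) :
    (winC y K m).length = K - 1 := by
  simp [winC]
  omega

theorem winC_getD (y : List Int) (K m t : Nat) (hm : m ≤ y.length) (hK : K ≤ m) (ht : t < K - 1) :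
    (winC y K m).getD t 0 = y.getD (m + 1 - K + t) 0 := by
  rw [List.getD_eq_getElem?_getD, List.getD_eq_getElem?_getD]
  unfold winC
  rw [List.getElem?_drop, List.getElem?_take_of_lt (by omega)]

theorem winC_forall (y : List Int) (k : Int) (m : Nat) (P : Int → Prop)
    (hk : 1 ≤ k) (hmk : k < (m : Int)) (hmn : m ≤ y.length) :
    (∀ v ∈ winC y k.toNat m, P v) ↔
      (∀ j ∈ PySem.List.pyRange 1 k 1, P (PySem.List.pyGetD y ((m : Int) - j) 0)) := by
  have hkN : ((k.toNat : Int)) = k := Int.toNat_of_nonneg (by omega)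
  have hKm : k.toNat ≤ m := by omega
  have hlen : (winC y k.toNat m).length = k.toNat - 1 := winC_length y k.toNat m hKm hmn
  constructor
  · intro hall j hj
    rw [PySem.List.mem_pyRange_one] at hj
    obtain ⟨hj1, hj2⟩ := hj
    have hjN : ((j.toNat : Int)) = j := Int.toNat_of_nonneg (by omega)
    have htlt : k.toNat - 1 - j.toNat < k.toNat - 1 := by omega
    have htl : k.toNat - 1 - j.toNat < (winC y k.toNat m).length := by omega
    have hv := hall _ (List.getElem_mem htl)
    rw [← List.getD_eq_getElem _ 0 htl, winC_getD y k.toNat m _ hmn hKm htlt] at hv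
    rw [PySem.List.pyGetD_eq_getElem (xs := y) (d := 0) (by omega) (by omega),
      ← List.getD_eq_getElem y 0 (by omega : ((m : Int) - j).toNat < y.length)]
    rw [show ((m : Int) - j).toNat = m + 1 - k.toNat + (k.toNat - 1 - j.toNat) by omega]
    exact hv
  · intro hall v hv
    rw [List.mem_iff_getElem] at hv
    obtain ⟨t, htl, hvt⟩ := hv
    have htK : t < k.toNat - 1 := by omega
    have hjmem : ((k.toNat : Int) - 1 - t) ∈ PySem.List.pyRange 1 k 1 :=
      PySem.List.mem_pyRange_one.2 ⟨by omega, by omega⟩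
    have := hall _ hjmem
    rw [PySem.List.pyGetD_eq_getElem (xs := y) (d := 0) (by omega) (by omega),
      ← List.getD_eq_getElem y 0 (by omega : ((m : Int) - ((k.toNat : Int) - 1 - t)).toNat < y.length)] at this
    rw [show ((m : Int) - ((k.toNat : Int) - 1 - t)).toNat = m + 1 - k.toNat + t by omega] at this
    rw [← hvt, ← List.getD_eq_getElem _ 0 htl, winC_getD y k.toNat m t hmn hKm htK]
    exact this

theorem szCountStart_eq_iff (y : List Int) (i acc : Int) :
    ∀ (js : List Int) (l : Int),
      (szCountStart y i acc js l = l + js.length ↔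
        ∀ j ∈ js, PySem.List.pyGetD y i 0 - PySem.List.pyGetD y (i - j) 0 < -acc) := by
  intro js
  induction js with
  | nil => intro l; simp [szCountStart]
  | cons j js ih =>
    intro l
    by_cases hc : PySem.List.pyGetD y i 0 - PySem.List.pyGetD y (i - j) 0 < -acc
    · rw [szCountStart, if_pos hc]
      have := ih (l + 1)
      constructor
      · intro h
        refine fun j' hj' => ?_
        rcases List.mem_cons.1 hj' with h' | h'
        · subst h'; exact hc
        · exact (this.1 (by rw [h]; simp; omega)) j' h'
      · intro h
        rw [this.2 (fun j' hj' => h j' (List.mem_cons_of_mem _ hj'))]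
        simp
        omega
    · rw [szCountStart, if_neg hc]
      constructor
      · intro h
        exfalso
        simp at h
        omega
      · intro h
        exact absurd (h j (List.mem_cons_self)) hc

theorem szCountStop_eq_iff (y : List Int) (i acc : Int) :
    ∀ (js : List Int) (l : Int),
      (szCountStop y i acc js l = l + js.length ↔
        ∀ j ∈ js, PySem.List.pyGetD y i 0 - PySem.List.pyGetD y (i - j) 0 > acc) := by
  intro js
  induction js with
  | nil => intro l; simp [szCountStop]
  | cons j js ih =>
    intro l
    by_cases hc : PySem.List.pyGetD y i 0 - PySem.List.pyGetD y (i - j) 0 > acc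
    · rw [szCountStop, if_pos hc]
      have := ih (l + 1)
      constructor
      · intro h
        refine fun j' hj' => ?_
        rcases List.mem_cons.1 hj' with h' | h'
        · subst h'; exact hc
        · exact (this.1 (by rw [h]; simp; omega)) j' h'
      · intro h
        rw [this.2 (fun j' hj' => h j' (List.mem_cons_of_mem _ hj'))]
        simp
        omega
    · rw [szCountStop, if_neg hc]
      constructor
      · intro h
        exfalso
        simp at h
        omega
      · intro h
        exact absurd (h j (List.mem_cons_self)) hc

theorem pyGetD_nat (y : List Int) (m : Nat) (hm : m < y.length) :
    PySem.List.pyGetD y (m : Int) 0 = y[m] := by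
  rw [PySem.List.pyGetD_natCast, List.getD_eq_getElem y 0 hm]

theorem last_idx_eq (l : List Int) (h : l ≠ []) :
    PySem.List.pyGetD l ((l.length : Int) - 1) 0 = PySem.List.pyGetD l (-1) 0 := by
  have hl : 0 < l.length := List.length_pos_of_ne_nil h
  rw [PySem.List.pyGetD_neg_one l 0 h,
    PySem.List.pyGetD_eq_getElem (xs := l) (d := 0) (by omega) (by omega),
    List.getLast_eq_getElem]
  congr 1
  omega

theorem pyGetD_map_neg (y : List Int) (i : Int) (h0 : 0 ≤ i) (h1 : i < y.length) :
    PySem.List.pyGetD (y.map (fun v => -v)) i 0 = -PySem.List.pyGetD y i 0 := by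
  rw [PySem.List.pyGetD_eq_getElem (xs := y) (d := 0) h0 h1,
    PySem.List.pyGetD_eq_getElem (xs := y.map (fun v => -v)) (d := 0) h0 (by simpa using h1)]
  simp

theorem dq_step_small (z : List Int) (K : Nat) (m : Nat) (hm : m < z.length)
    (d : List Int) (lo : Nat) (x : Int) (hx : x = z[m])
    (hlo : lo ≤ d.length) (hd : d.drop lo = sfx (winC z K m)) (hj : m + 1 < K) :
    lo ≤ (szPopGT d lo x ++ [x]).length ∧
      (szPopGT d lo x ++ [x]).drop lo = sfx (winC z K (m+1)) := by
  rcases push_bridge d lo x hlo with ⟨hp1, hp2⟩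
  refine ⟨by simp; omega, ?_⟩
  rw [hp1, hd, ← sfx_push, winC_succ_lt z K m hj hm, hx]

theorem dq_step (z : List Int) (K : Nat) (hK : 1 ≤ K) (m : Nat) (hm : m < z.length)
    (d : List Int) (lo : Nat) (x vout : Int)
    (hx : x = z[m]) (hv : vout = z.getD (m + 1 - K) 0)
    (hlo : lo ≤ d.length) (hd : d.drop lo = sfx (winC z K m)) (hj : K ≤ m + 1) :
    (if lo < (szPopGT d lo x ++ [x]).length ∧
        PySem.List.pyGetD (szPopGT d lo x ++ [x]) (lo : Int) 0 = vout then lo + 1 else lo)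
      ≤ (szPopGT d lo x ++ [x]).length ∧
    (szPopGT d lo x ++ [x]).drop
      (if lo < (szPopGT d lo x ++ [x]).length ∧
          PySem.List.pyGetD (szPopGT d lo x ++ [x]) (lo : Int) 0 = vout then lo + 1 else lo)
      = sfx (winC z K (m+1)) := by
  rcases push_bridge d lo x hlo with ⟨hp1, hp2⟩
  have hloD : lo ≤ (szPopGT d lo x ++ [x]).length := by simp; omega
  rcases evict_bridge (szPopGT d lo x ++ [x]) lo vout hloD with ⟨he1, he2⟩
  refine ⟨he2, ?_⟩
  rw [he1, hp1, hd, ← sfx_push, hx, winC_succ_eq z K m hK hj hm, hv, sfx_evict]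

def BInv (y : List Int) (K m : Nat)
    (sb : List Int × List Int × Int × List Int × Nat × List Int × Nat) : Prop :=
  sb.2.2.2.2.1 ≤ sb.2.2.2.1.length ∧
  sb.2.2.2.1.drop sb.2.2.2.2.1 = sfx (winC y K m) ∧
  sb.2.2.2.2.2.2 ≤ sb.2.2.2.2.2.1.length ∧
  sb.2.2.2.2.2.1.drop sb.2.2.2.2.2.2 = sfx (winC (y.map (fun v => -v)) K m)

theorem step_main (y : List Int) (k acc dmin : Int) (hk : 1 ≤ k) (m : Nat) (hm : m < y.length)
    (sa : List Int × List Int × Int)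
    (sb : List Int × List Int × Int × List Int × Nat × List Int × Nat)
    (h1 : sb.1 = sa.1) (h2 : sb.2.1 = sa.2.1) (h3 : sb.2.2.1 = sa.2.2)
    (hinv : BInv y k.toNat m sb) :
    (szStepB y k acc dmin sb ((m : Int), y[m])).1
        = (szStepA y k acc dmin sa ((m : Int), y[m])).1 ∧
    (szStepB y k acc dmin sb ((m : Int), y[m])).2.1
        = (szStepA y k acc dmin sa ((m : Int), y[m])).2.1 ∧
    (szStepB y k acc dmin sb ((m : Int), y[m])).2.2.1
        = (szStepA y k acc dmin sa ((m : Int), y[m])).2.2 ∧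
    BInv y k.toNat (m+1) (szStepB y k acc dmin sb ((m : Int), y[m])) := by
  obtain ⟨a1, a2, a3⟩ := sa
  obtain ⟨b1, b2, b3, dlo, lo, dhi, hi⟩ := sb
  simp only at h1 h2 h3
  subst h1
  subst h2
  subst h3
  simp only [BInv] at hinv
  obtain ⟨hlo, hdlo, hhi, hdhi⟩ := hinv
  have hmn : m ≤ y.length := le_of_lt hm
  have hkN : ((k.toNat : Int)) = k := Int.toNat_of_nonneg (by omega)
  -- the deque update is independent of the start/stop tests
  have hdq : BInv y k.toNat (m+1)
      (szStepB y k acc dmin (b1, b2, b3, dlo, lo, dhi, hi) ((m : Int), y[m])) := by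
    unfold BInv
    dsimp only [szStepB]
    have hm' : m < (y.map (fun v => -v)).length := by simpa using hm
    by_cases hj : (m : Int) - k + 1 ≥ 0
    · rw [if_pos hj]
      dsimp only
      have hKm1 : k.toNat ≤ m + 1 := by omega
      have hvout : PySem.List.pyGetD y ((m : Int) - k + 1) 0 = y.getD (m + 1 - k.toNat) 0 := by
        rw [PySem.List.pyGetD_eq_getElem (xs := y) (d := 0) (by omega) (by omega),
          ← List.getD_eq_getElem y 0 (by omega)]
        congr 1
        omega
      have hvout' : -PySem.List.pyGetD y ((m : Int) - k + 1) 0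
          = (y.map (fun v => -v)).getD (m + 1 - k.toNat) 0 := by
        rw [← pyGetD_map_neg y ((m : Int) - k + 1) (by omega) (by omega)]
        rw [PySem.List.pyGetD_eq_getElem (xs := y.map (fun v => -v)) (d := 0) (by omega)
            (by simp; omega),
          ← List.getD_eq_getElem _ 0 (by simp; omega)]
        congr 1
        omega
      have hx' : -(y[m]) = (y.map (fun v => -v))[m]'hm' := by simp
      have H1 := dq_step y k.toNat (by omega) m hm dlo lo (y[m])
        (PySem.List.pyGetD y ((m : Int) - k + 1) 0) rfl hvout hlo hdlo hKm1
      have H2 := dq_step (y.map (fun v => -v)) k.toNat (by omega) m hm' dhi hi (-(y[m]))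
        (-PySem.List.pyGetD y ((m : Int) - k + 1) 0) hx' hvout' hhi hdhi hKm1
      exact ⟨H1.1, H1.2, H2.1, H2.2⟩
    · rw [if_neg hj]
      dsimp only
      have hj' : m + 1 < k.toNat := by omega
      have hx' : -(y[m]) = (y.map (fun v => -v))[m]'hm' := by simp
      have H1 := dq_step_small y k.toNat m hm dlo lo (y[m]) rfl hlo hdlo hj'
      have H2 := dq_step_small (y.map (fun v => -v)) k.toNat m hm' dhi hi (-(y[m])) hx' hhi hdhi hj'
      exact ⟨H1.1, H1.2, H2.1, H2.2⟩
  refine ⟨?_, ?_, ?_, hdq⟩ <;> clear hdq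
  all_goals (
    by_cases him : (m : Int) > k
    case neg =>
      dsimp only [szStepA, szStepB]
      simp [him]
    case pos =>
      have hAS : (szCountStart y (m : Int) acc (PySem.List.pyRange 1 k 1) 0 = k - 1)
          ↔ (lo = dlo.length ∨ PySem.List.pyGetD dlo (lo : Int) 0 > y[m] + acc) := by
        rw [show (k - 1 : Int) = 0 + ((PySem.List.pyRange 1 k 1).length : Int) from by
            rw [PySem.List.length_pyRange_one]; omega,
          szCountStart_eq_iff,
          test_bridge dlo lo (y[m] + acc) (winC y k.toNat m) hlo hdlo,
          winC_forall y k m (fun v => y[m] + acc < v) hk him hmn]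
        constructor
        · intro h j hj
          have := h j hj
          rw [pyGetD_nat y m hm] at this
          omega
        · intro h j hj
          have := h j hj
          rw [pyGetD_nat y m hm]
          omega
      have hAT : (szCountStop y (m : Int) acc (PySem.List.pyRange 1 k 1) 0 = k - 1)
          ↔ (hi = dhi.length ∨ PySem.List.pyGetD dhi (hi : Int) 0 > acc - y[m]) := by
        rw [show (k - 1 : Int) = 0 + ((PySem.List.pyRange 1 k 1).length : Int) from by
            rw [PySem.List.length_pyRange_one]; omega,
          szCountStop_eq_iff,
          test_bridge dhi hi (acc - y[m]) (winC (y.map (fun v => -v)) k.toNat m) hhi hdhi,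
          winC_forall (y.map (fun v => -v)) k m (fun v => acc - y[m] < v) hk him
            (by simpa using hmn)]
        constructor
        · intro h j hj
          have hjb := PySem.List.mem_pyRange_one.1 hj
          have := h j hj
          rw [pyGetD_nat y m hm] at this
          rw [pyGetD_map_neg y ((m : Int) - j) (by omega) (by omega)]
          omega
        · intro h j hj
          have hjb := PySem.List.mem_pyRange_one.1 hj
          have := h j hj
          rw [pyGetD_map_neg y ((m : Int) - j) (by omega) (by omega)] at this
          rw [pyGetD_nat y m hm]
          omega
      dsimp only [szStepA, szStepB]
      simp only [hAS, hAT]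
      rw [if_pos him]
      by_cases hsf : b3 = 0
      · rw [if_pos hsf]
        by_cases hS : lo = dlo.length ∨ PySem.List.pyGetD dlo (lo : Int) 0 > y[m] + acc
        · rw [if_pos hS]
          try rw [if_pos (show (m : Int) > k ∧ b3 = 0 ∧ (lo = dlo.length ∨ PySem.List.pyGetD dlo (lo : Int) 0 > y[m] + acc) from ⟨him, hsf, hS⟩)]
          by_cases hemp : b1 = []
          · rw [if_neg (show ¬(b1.length ≠ 0) by simp [hemp])]
            try rw [if_pos (Or.inl hemp)]
            dsimp only
            rw [if_pos (show (1 : Int) = 1 from rfl)]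
            by_cases hT : hi = dhi.length ∨ PySem.List.pyGetD dhi (hi : Int) 0 > acc - y[m]
            · rw [if_pos hT]
              try rw [if_pos (show (m : Int) > k ∧ (1 : Int) = 1 ∧ (hi = dhi.length ∨ PySem.List.pyGetD dhi (hi : Int) 0 > acc - y[m]) from ⟨him, rfl, hT⟩)]
              by_cases hemp2 : b2 = []
              · rw [if_neg (show ¬(b2.length ≠ 0) by simp [hemp2])]
                try rw [if_pos (Or.inl hemp2)]
                try rfl
              · rw [if_pos (show b2.length ≠ 0 by simp [hemp2]), last_idx_eq b2 hemp2]
                by_cases hsp2 : (m : Int) - PySem.List.pyGetD b2 (-1) 0 > dmin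
                · rw [if_pos hsp2]
                  try rw [if_pos (Or.inr hsp2)]
                  try rfl
                · rw [if_neg hsp2]
                  try rw [if_neg (show ¬(b2 = [] ∨ (m : Int) - PySem.List.pyGetD b2 (-1) 0 > dmin) from by rintro (h | h); exact hemp2 h; exact hsp2 h)]
                  try rfl
            · rw [if_neg hT]
              try rw [if_neg (show ¬((m : Int) > k ∧ (1 : Int) = 1 ∧ (hi = dhi.length ∨ PySem.List.pyGetD dhi (hi : Int) 0 > acc - y[m])) from fun hc => hT hc.2.2)]
              try rfl
          · rw [if_pos (show b1.length ≠ 0 by simp [hemp]), last_idx_eq b1 hemp]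
            by_cases hsp : (m : Int) - PySem.List.pyGetD b1 (-1) 0 > dmin
            · rw [if_pos hsp]
              try rw [if_pos (Or.inr hsp)]
              dsimp only
              rw [if_pos (show (1 : Int) = 1 from rfl)]
              by_cases hT : hi = dhi.length ∨ PySem.List.pyGetD dhi (hi : Int) 0 > acc - y[m]
              · rw [if_pos hT]
                try rw [if_pos (show (m : Int) > k ∧ (1 : Int) = 1 ∧ (hi = dhi.length ∨ PySem.List.pyGetD dhi (hi : Int) 0 > acc - y[m]) from ⟨him, rfl, hT⟩)]
                by_cases hemp2 : b2 = []
                · rw [if_neg (show ¬(b2.length ≠ 0) by simp [hemp2])]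
                  try rw [if_pos (Or.inl hemp2)]
                  try rfl
                · rw [if_pos (show b2.length ≠ 0 by simp [hemp2]), last_idx_eq b2 hemp2]
                  by_cases hsp2 : (m : Int) - PySem.List.pyGetD b2 (-1) 0 > dmin
                  · rw [if_pos hsp2]
                    try rw [if_pos (Or.inr hsp2)]
                    try rfl
                  · rw [if_neg hsp2]
                    try rw [if_neg (show ¬(b2 = [] ∨ (m : Int) - PySem.List.pyGetD b2 (-1) 0 > dmin) from by rintro (h | h); exact hemp2 h; exact hsp2 h)]
                    try rfl
              · rw [if_neg hT]
                try rw [if_neg (show ¬((m : Int) > k ∧ (1 : Int) = 1 ∧ (hi = dhi.length ∨ PySem.List.pyGetD dhi (hi : Int) 0 > acc - y[m])) from fun hc => hT hc.2.2)]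
                try rfl
            · rw [if_neg hsp]
              try rw [if_neg (show ¬(b1 = [] ∨ (m : Int) - PySem.List.pyGetD b1 (-1) 0 > dmin) from by rintro (h | h); exact hemp h; exact hsp h)]
              dsimp only
              rw [if_neg (show ¬(b3 = 1) by omega)]
              try rw [if_neg (show ¬((m : Int) > k ∧ b3 = 1 ∧ (hi = dhi.length ∨ PySem.List.pyGetD dhi (hi : Int) 0 > acc - y[m])) from fun hc => absurd hc.2.1 (by omega))]
              try rfl
        · rw [if_neg hS]
          try rw [if_neg (show ¬((m : Int) > k ∧ b3 = 0 ∧ (lo = dlo.length ∨ PySem.List.pyGetD dlo (lo : Int) 0 > y[m] + acc)) from fun hc => hS hc.2.2)]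
          dsimp only
          rw [if_neg (show ¬(b3 = 1) by omega)]
          try rw [if_neg (show ¬((m : Int) > k ∧ b3 = 1 ∧ (hi = dhi.length ∨ PySem.List.pyGetD dhi (hi : Int) 0 > acc - y[m])) from fun hc => absurd hc.2.1 (by omega))]
          try rfl
      · rw [if_neg hsf]
        try rw [if_neg (show ¬((m : Int) > k ∧ b3 = 0 ∧ (lo = dlo.length ∨ PySem.List.pyGetD dlo (lo : Int) 0 > y[m] + acc)) from fun hc => hsf hc.2.1)]
        dsimp only
        by_cases hb31 : b3 = 1
        · rw [hb31]
          rw [if_pos (show (1 : Int) = 1 from rfl)]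
          by_cases hT : hi = dhi.length ∨ PySem.List.pyGetD dhi (hi : Int) 0 > acc - y[m]
          · rw [if_pos hT]
            try rw [if_pos (show (m : Int) > k ∧ (1 : Int) = 1 ∧ (hi = dhi.length ∨ PySem.List.pyGetD dhi (hi : Int) 0 > acc - y[m]) from ⟨him, rfl, hT⟩)]
            by_cases hemp2 : b2 = []
            · rw [if_neg (show ¬(b2.length ≠ 0) by simp [hemp2])]
              try rw [if_pos (Or.inl hemp2)]
              try rfl
            · rw [if_pos (show b2.length ≠ 0 by simp [hemp2]), last_idx_eq b2 hemp2]
              by_cases hsp2 : (m : Int) - PySem.List.pyGetD b2 (-1) 0 > dmin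
              · rw [if_pos hsp2]
                try rw [if_pos (Or.inr hsp2)]
                try rfl
              · rw [if_neg hsp2]
                try rw [if_neg (show ¬(b2 = [] ∨ (m : Int) - PySem.List.pyGetD b2 (-1) 0 > dmin) from by rintro (h | h); exact hemp2 h; exact hsp2 h)]
                try rfl
          · rw [if_neg hT]
            try rw [if_neg (show ¬((m : Int) > k ∧ (1 : Int) = 1 ∧ (hi = dhi.length ∨ PySem.List.pyGetD dhi (hi : Int) 0 > acc - y[m])) from fun hc => hT hc.2.2)]
            try rfl
        · rw [if_neg hb31]
          try rw [if_neg (show ¬((m : Int) > k ∧ b3 = 1 ∧ (hi = dhi.length ∨ PySem.List.pyGetD dhi (hi : Int) 0 > acc - y[m])) from fun hc => hb31 hc.2.1)]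
          try rfl
    )

theorem take_add_one_gen {α : Type} (l : List α) (n : Nat) (h : n < l.length) :
    l.take (n+1) = l.take n ++ [l[n]] := by
  rw [List.take_add_one]; simp [List.getElem?_eq_getElem h]

theorem fold_inv (y : List Int) (k acc dmin : Int) (hk : 1 ≤ k) :
    ∀ m, m ≤ y.length →
      ((((PySem.List.enumerate y 0).take m).foldl (szStepB y k acc dmin)
          ([], [], 0, [], 0, [], 0)).1
        = (((PySem.List.enumerate y 0).take m).foldl (szStepA y k acc dmin) ([], [], 0)).1 ∧
      (((PySem.List.enumerate y 0).take m).foldl (szStepB y k acc dmin)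
          ([], [], 0, [], 0, [], 0)).2.1
        = (((PySem.List.enumerate y 0).take m).foldl (szStepA y k acc dmin) ([], [], 0)).2.1 ∧
      (((PySem.List.enumerate y 0).take m).foldl (szStepB y k acc dmin)
          ([], [], 0, [], 0, [], 0)).2.2.1
        = (((PySem.List.enumerate y 0).take m).foldl (szStepA y k acc dmin) ([], [], 0)).2.2 ∧
      BInv y k.toNat m
        (((PySem.List.enumerate y 0).take m).foldl (szStepB y k acc dmin)
          ([], [], 0, [], 0, [], 0))) := by
  intro m
  induction m with
  | zero =>
    intro _
    refine ⟨rfl, rfl, rfl, ?_⟩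
    unfold BInv
    simp [winC_zero, sfx]
  | succ m ih =>
    intro hm1
    have hm : m < y.length := by omega
    have henl : m < (PySem.List.enumerate y 0).length := by
      rw [PySem.List.length_enumerate]; omega
    have htake : (PySem.List.enumerate y 0).take (m+1)
        = (PySem.List.enumerate y 0).take m ++ [((m : Int), y[m])] := by
      rw [take_add_one_gen _ m henl]
      congr 1
      rw [PySem.List.getElem_enumerate]
      simp
    rw [htake, List.foldl_append, List.foldl_append]
    simp only [List.foldl_cons, List.foldl_nil]
    rcases ih (by omega) with ⟨i1, i2, i3, i4⟩
    exact step_main y k acc dmin hk m hm _ _ i1 i2 i3 i4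

theorem stepA_trivial (y : List Int) (k acc dmin : Int) (hk : k < 1) (p : Int × Int) :
    szStepA y k acc dmin ([], [], 0) p = ([], [], 0) := by
  dsimp only [szStepA]
  by_cases him : p.1 > k
  · rw [if_pos him, if_pos rfl, PySem.List.pyRange_one_eq_nil (by omega)]
    rw [show szCountStart y p.1 acc [] 0 = 0 from rfl]
    rw [if_neg (show ¬((0 : Int) = k - 1) by omega)]
    dsimp only
    rw [if_neg (show ¬((0 : Int) = 1) by omega)]
  · rw [if_neg him]

theorem foldA_trivial (y : List Int) (k acc dmin : Int) (hk : k < 1) :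
    ∀ (l : List (Int × Int)), l.foldl (szStepA y k acc dmin) ([], [], 0) = ([], [], 0) := by
  intro l
  induction l with
  | nil => rfl
  | cons p l ih => rw [List.foldl_cons, stepA_trivial y k acc dmin hk p, ih]

theorem sz_main (y : List Int) (k acc dmin : Int) :
    szukajInterwalow y k acc dmin = szukajInterwalow_alt y k acc dmin := by
  by_cases hk : k < 1
  · unfold szukajInterwalow szukajInterwalow_alt
    rw [if_pos hk, foldA_trivial y k acc dmin hk]
  · unfold szukajInterwalow szukajInterwalow_alt
    rw [if_neg hk]
    have h := fold_inv y k acc dmin (by omega) y.length (le_refl _)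
    have htk : (PySem.List.enumerate y 0).take y.length = PySem.List.enumerate y 0 := by
      conv_lhs => rw [← PySem.List.length_enumerate (xs := y) (s := 0)]
      exact List.take_length
    rw [htk] at h
    obtain ⟨h1, h2, _, _⟩ := h
    dsimp only
    rw [← h1, ← h2]

-- ===== VERDICT (by name: the statement is the Claim_ definition above) =====
theorem szukajInterwalow_spec : Claim_equal_szukajInterwalow := by
  intro wykresTableY ccuracy_liczba_probek accuracy_pace_diff_for_interval_search point_distance_minimal_between_interwals _
  exact sz_main wykresTableY ccuracy_liczba_probek accuracy_pace_diff_for_interval_search point_distance_minimal_between_interwals
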